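-- pv_equiv track=rewrite | github.com/mrbartrns/algorithm-and-structure | BOJ/review/boj_17140_1.py | get_new_arr
-- ===== SOURCE A (Python) =====
-- import heapq
--
-- def get_new_arr(arr):
--     numbers = set()
--     values = [0] * 101
--     q = []
--     ret = []
--     for i in range(len(arr)):
--         num = arr[i]
--         if num > 0:
--             numbers.add(num)
--             values[num] += 1
--
--     for number in numbers:
--         heapq.heappush(q, (values[number], number))
--
--     while q:
--         cnt, number = heapq.heappop(q)
--         if len(ret) < 100:
--             ret.append(number)
--         if len(ret) < 100:
--             ret.append(cnt)
--     return ret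
-- ===== SOURCE B (Python) =====
-- def get_new_arr(arr):
--     counts = {}
--     for num in arr:
--         if num > 0:
--             counts[num] = counts.get(num, 0) + 1
--     flat = []
--     for number, cnt in sorted(counts.items(), key=lambda kv: (kv[1], kv[0])):
--         flat.append(number)
--         flat.append(cnt)
--     return flat[:100]
-- ===== Notes on version B (the rewrite author's own statement) =====
-- stated objective: simpler
-- what changed: Replaces the fixed 101-slot tally array plus set plus heapq push/pop phases with a single counting dict, one sorted() pass over its items keyed by (count, number), and a flat list truncated to 100 with a slice instead of per-append guards.
-- outside the precondition, e.g. on get_new_arr([101]): A raises IndexError, B returns [101, 1]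
-- crash fix: A raises IndexError whenever some element exceeds 100 (values[num] overruns the 101-slot array); B has no fixed array and returns the normal flattening of (number, count) pairs there. — e.g. on get_new_arr([101]): A raises IndexError, B returns [101, 1]
import Mathlib
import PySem

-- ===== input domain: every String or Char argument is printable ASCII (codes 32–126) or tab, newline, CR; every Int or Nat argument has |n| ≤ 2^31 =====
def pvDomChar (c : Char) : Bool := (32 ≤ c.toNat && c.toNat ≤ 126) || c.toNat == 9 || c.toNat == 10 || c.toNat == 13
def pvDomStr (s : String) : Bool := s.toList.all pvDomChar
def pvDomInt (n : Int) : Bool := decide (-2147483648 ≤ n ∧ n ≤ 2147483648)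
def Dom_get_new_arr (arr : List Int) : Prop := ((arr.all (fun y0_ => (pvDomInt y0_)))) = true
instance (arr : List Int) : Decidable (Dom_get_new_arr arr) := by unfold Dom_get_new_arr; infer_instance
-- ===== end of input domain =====

-- B replaces A's tally array + set + heapq push/pop phases by one counting dict, a single
-- sorted() pass over its (number, count) items keyed by (count, number), and a final slice
-- to 100 elements; objective: simpler.

-- ===== PORT A =====
-- heapq priority queue ported as the priority-queue ADT over a sorted list: heappush inserts
-- at the position given by Python's tuple '<' (lexicographic), heappop takes the least element
-- (the head).  Exact here because all queued tuples are distinct (distinct second components),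
-- so the pop sequence of the binary heap is exactly ascending tuple order.
def heapPush (q : List (Int × Int)) (x : Int × Int) : List (Int × Int) :=
  PySem.List.insertBy (fun a b => decide (a.1 < b.1 ∨ (a.1 = b.1 ∧ a.2 < b.2))) x q

-- the 'while q' pop loop with its two guarded appends
def emitA : List (Int × Int) → List Int → List Int
  | [], ret => ret
  | (cnt, number) :: rest, ret =>
    let ret1 := if ret.length < 100 then ret ++ [number] else ret
    let ret2 := if ret1.length < 100 then ret1 ++ [cnt] else ret1
    emitA rest ret2

-- the result does not depend on the (unmodelled) hash-iteration order of the Python set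
-- 'numbers': every queued tuple is distinct, so popping the whole heap sorts them.
def get_new_arr (arr : List Int) : List Int :=
  let st : PySem.Set Int × List Int :=
    (PySem.List.pyRange 0 (PySem.List.len arr) 1).foldl
      (fun st i =>
        let num := PySem.List.pyGetD arr i 0
        if num > 0 then
          (PySem.Set.add st.1 num, PySem.List.pySetD st.2 num (PySem.List.pyGetD st.2 num 0 + 1))
        else st)
      (PySem.Set.empty, List.replicate 101 0)
  let q := st.1.foldl (fun q number => heapPush q (PySem.List.pyGetD st.2 number 0, number)) []
  emitA q []

-- ===== PORT B =====
def get_new_arr_alt (arr : List Int) : List Int :=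
  let counts : PySem.Dict Int Int :=
    arr.foldl (fun d num => if num > 0 then d.insert num (d.getD num 0 + 1) else d) PySem.Dict.empty
  let flat :=
    (PySem.List.sorted2 counts.items (fun kv => kv.2) (fun kv => kv.1)).foldl
      (fun acc kv => acc ++ [kv.1, kv.2]) []
  PySem.List.slice flat none (some 100)

-- ===== PRECONDITION & SPEC =====
-- Pre_ excludes exactly the inputs on which A raises IndexError: an element above 100
-- overruns A's fixed 101-slot tally array ('values[num] += 1').
def Pre_get_new_arr (arr : List Int) : Prop := ∀ x ∈ arr, x ≤ 100
instance (arr : List Int) : Decidable (Pre_get_new_arr arr) := by unfold Pre_get_new_arr; infer_instance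
def pvWitness_get_new_arr : List Int := [2, 1, 2, -3, 2, 1]

-- A raises IndexError whenever some element exceeds 100; B returns the normal flattening there.
def Raises_get_new_arr (arr : List Int) : Prop := ∃ x ∈ arr, 100 < x
instance (arr : List Int) : Decidable (Raises_get_new_arr arr) := by unfold Raises_get_new_arr; infer_instance
def pvRaiseWitness_get_new_arr : List Int := [101]
def pvRaiseWitnessOut_get_new_arr : List Int := [101, 1]

def Spec_get_new_arr (arr : List Int) (out : List Int) : Prop := out = get_new_arr_alt arr
instance (arr : List Int) (out : List Int) : Decidable (Spec_get_new_arr arr out) := by unfold Spec_get_new_arr; infer_instance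

-- ===== CLAIM (what is proved, stated in full; the proofs are below) =====
def Claim_equal_get_new_arr : Prop := ∀ (arr : List Int), Dom_get_new_arr arr → Pre_get_new_arr arr → Spec_get_new_arr arr (get_new_arr arr)
def Claim_raises_get_new_arr : Prop := (∀ (arr : List Int), Dom_get_new_arr arr → Raises_get_new_arr arr → ¬ Pre_get_new_arr arr) ∧ (Dom_get_new_arr (pvRaiseWitness_get_new_arr) ∧ Raises_get_new_arr (pvRaiseWitness_get_new_arr) ∧ get_new_arr_alt (pvRaiseWitness_get_new_arr) = pvRaiseWitnessOut_get_new_arr)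

-- ===== LEMMAS AND PROOFS =====

-- the comparator PySem.List.sorted2 uses on (number, cnt) with keys (·.2, ·.1) is, under
-- component swap, exactly A's lexicographic tuple '<' on (cnt, number)
lemma before_swap (p q : Int × Int) :
    (decide (p.2 < q.2) || (!decide (q.2 < p.2) && decide (p.1 < q.1)))
      = decide ((p.2, p.1).1 < (q.2, q.1).1 ∨ ((p.2, p.1).1 = (q.2, q.1).1 ∧ (p.2, p.1).2 < (q.2, q.1).2)) := by
  by_cases h1 : p.2 < q.2 <;> by_cases h2 : q.2 < p.2 <;> by_cases h3 : p.1 < q.1 <;>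
    simp [h1, h2, h3] <;> omega

lemma insertBy_map_swap (bB bA : Int × Int → Int × Int → Bool)
    (h : ∀ p q, bB p q = bA (p.2, p.1) (q.2, q.1))
    (x : Int × Int) (l : List (Int × Int)) :
    (PySem.List.insertBy bB x l).map (fun p => (p.2, p.1))
      = PySem.List.insertBy bA (x.2, x.1) (l.map (fun p => (p.2, p.1))) := by
  induction l with
  | nil => simp [PySem.List.insertBy]
  | cons y ys ih =>
    simp only [PySem.List.insertBy, List.map_cons, h x y]
    by_cases hc : bA (x.2, x.1) (y.2, y.1) = true
    · simp [hc]
    · simp [hc, ih]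

-- the sorted-insert fold (sorted2's insertion sort) commutes with swapping the pair components
lemma fold_insert_map_swap (l : List (Int × Int)) (acc : List (Int × Int)) :
    (l.foldl (fun acc x =>
        PySem.List.insertBy (fun a b => decide (a.2 < b.2) || (!decide (b.2 < a.2) && decide (a.1 < b.1))) x acc) acc).map (fun p => (p.2, p.1))
      = (l.map (fun p => (p.2, p.1))).foldl (fun acc x => heapPush acc x) (acc.map (fun p => (p.2, p.1))) := by
  induction l generalizing acc with
  | nil => simp
  | cons x xs ih =>
    simp only [List.foldl_cons, List.map_cons, ih]
    congr 1
    rw [heapPush]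
    exact insertBy_map_swap _ _ (fun p q => before_swap p q) x acc

-- tally-array invariant: after the count loop over l (all indices nonneg and in range),
-- slot n holds its old value plus the number of occurrences of n in l
lemma vfold_getD (l : List Int) (v : List Int) (n : Int)
    (hl : ∀ x ∈ l, 0 ≤ x ∧ x < (v.length : Int)) (hn : 0 ≤ n) :
    PySem.List.pyGetD (l.foldl (fun v x => PySem.List.pySetD v x (PySem.List.pyGetD v x 0 + 1)) v) n 0
      = PySem.List.pyGetD v n 0 + (l.count n : Int) := by
  induction l generalizing v with
  | nil => simp
  | cons x xs ih =>
    obtain ⟨hx0, hxlt⟩ := hl x (by simp)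
    rw [List.foldl_cons, ih _ (by
      intro y hy
      have := hl y (by simp [hy])
      simpa [PySem.List.length_pySetD] using this)]
    have key : PySem.List.pyGetD (PySem.List.pySetD v x (PySem.List.pyGetD v x 0 + 1)) n 0
        = if n = x then PySem.List.pyGetD v x 0 + 1 else PySem.List.pyGetD v n 0 := by
      rw [PySem.List.pySetD_of_nonneg v _ hx0, PySem.List.pyGetD_of_nonneg _ _ hn,
          PySem.List.pyGetD_of_nonneg _ _ hn]
      rcases eq_or_ne n x with rfl | hne
      · simp [List.getD_eq_getElem?_getD]
        rw [List.getElem?_set_self (by omega)]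
        simp
      · simp only [List.getD_eq_getElem?_getD]
        rw [List.getElem?_set_ne (by omega), if_neg hne]
    rw [key]
    rcases eq_or_ne n x with rfl | hne
    · simp; ring
    · simp [hne, Ne.symm hne]

-- the pop loop with its per-append cap = flatten every (cnt, number) pair as number, cnt,
-- then truncate to 100 elements
lemma emitA_eq (q : List (Int × Int)) (ret : List Int) (h : ret.length ≤ 100) :
    emitA q ret = (ret ++ q.flatMap (fun p => [p.2, p.1])).take 100 := by
  induction q generalizing ret with
  | nil => simp [emitA, List.take_of_length_le (by simpa using h)]
  | cons p rest ih =>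
    obtain ⟨cnt, number⟩ := p
    by_cases h1 : ret.length < 100
    · by_cases h2 : ret.length + 1 < 100
      · have e : emitA ((cnt, number) :: rest) ret = emitA rest ((ret ++ [number]) ++ [cnt]) := by
          simp [emitA, h1, h2]
        have hlen : ((ret ++ [number]) ++ [cnt]).length ≤ 100 := by simp; omega
        rw [e, ih _ hlen]
        simp [List.append_assoc]
      · have h99 : ret.length = 99 := by omega
        have e : emitA ((cnt, number) :: rest) ret = emitA rest (ret ++ [number]) := by
          simp [emitA, h1, h2]
        have hlen : (ret ++ [number]).length ≤ 100 := by simp [h99]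
        rw [e, ih _ hlen]
        have r1 : List.take 100 ((ret ++ [number]) ++ List.flatMap (fun p => [p.2, p.1]) rest)
            = ret ++ [number] := by
          rw [List.take_append_of_le_length (by simp [h99])]
          exact List.take_of_length_le (by simp [h99])
        have r2 : List.take 100 (ret ++ List.flatMap (fun p => [p.2, p.1]) ((cnt, number) :: rest))
            = ret ++ [number] := by
          rw [List.flatMap_cons, show ret ++ ([number, cnt] ++ List.flatMap (fun p => [p.2, p.1]) rest)
                = (ret ++ [number]) ++ ([cnt] ++ List.flatMap (fun p => [p.2, p.1]) rest) by simp,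
              List.take_append_of_le_length (by simp [h99])]
          exact List.take_of_length_le (by simp [h99])
        rw [r1, r2]
    · have h100 : ret.length = 100 := by omega
      have e : emitA ((cnt, number) :: rest) ret = emitA rest ret := by
        simp [emitA, h1]
      rw [e, ih ret h]
      rw [List.take_append_of_le_length (by omega), List.take_append_of_le_length (by omega)]

-- ===== VERDICT (by name: the statement is the Claim_ definition above) =====
theorem get_new_arr_spec : Claim_equal_get_new_arr := by
  intro arr _ hpre
  unfold Spec_get_new_arr
  unfold get_new_arr get_new_arr_alt
  simp only []
  set l := arr.filter (fun x => decide (x > 0)) with hl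
  -- A's first loop: fold over range(len(arr)) = fold over arr
  rw [show PySem.List.len arr = ((arr.length : Int)) from rfl]
  rw [PySem.List.foldl_pyRange_zero_pyGetD' arr 0
    (f := fun (st : PySem.Set Int × List Int) num =>
      if num > 0 then
        (PySem.Set.add st.1 num, PySem.List.pySetD st.2 num (PySem.List.pyGetD st.2 num 0 + 1))
      else st)]
  -- split the paired state into its two independent accumulators
  rw [show (fun (st : PySem.Set Int × List Int) num =>
      if num > 0 then
        (PySem.Set.add st.1 num, PySem.List.pySetD st.2 num (PySem.List.pyGetD st.2 num 0 + 1))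
      else st)
    = (fun (st : PySem.Set Int × List Int) num =>
      ((fun s (num : Int) => if num > 0 then PySem.Set.add s num else s) st.1 num,
       (fun v (num : Int) => if num > 0 then PySem.List.pySetD v num (PySem.List.pyGetD v num 0 + 1) else v) st.2 num)) from by
    funext st num; by_cases h : num > 0 <;> simp [h]]
  rw [PySem.List.foldl_prod_mk
    (f := fun (s : PySem.Set Int) (num : Int) => if num > 0 then PySem.Set.add s num else s)
    (g := fun (v : List Int) (num : Int) => if num > 0 then PySem.List.pySetD v num (PySem.List.pyGetD v num 0 + 1) else v)]
  simp only []
  -- the guarded loops are folds over the filtered list l (on both sides)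
  rw [PySem.List.foldl_ite_eq_foldl_filter (p := fun (num : Int) => num > 0)
       (f := fun (s : PySem.Set Int) (num : Int) => PySem.Set.add s num),
     PySem.List.foldl_ite_eq_foldl_filter (p := fun (num : Int) => num > 0)
       (f := fun (v : List Int) (num : Int) => PySem.List.pySetD v num (PySem.List.pyGetD v num 0 + 1)),
     PySem.List.foldl_ite_eq_foldl_filter (p := fun (num : Int) => num > 0)
       (f := fun (d : PySem.Dict Int Int) (num : Int) => d.insert num (d.getD num 0 + 1))]
  rw [← hl]
  have hS : List.foldl (fun (s : PySem.Set Int) num => s.add num) PySem.Set.empty l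
      = PySem.Set.ofList l := by rw [PySem.Set.ofList_eq_foldl]; rfl
  rw [hS]
  -- the tally array holds the occurrence counts
  have hval : ∀ n ∈ PySem.Set.ofList l,
      PySem.List.pyGetD (List.foldl (fun v num => PySem.List.pySetD v num (PySem.List.pyGetD v num 0 + 1))
        (List.replicate 101 0) l) n 0 = (l.count n : Int) := by
    intro n hn
    have hnl : n ∈ l := (PySem.Set.mem_ofList l n).mp hn
    have hmem := List.mem_filter.mp (hl ▸ hnl)
    have hn0 : (0 : Int) < n := by simpa using hmem.2
    rw [vfold_getD l _ n ?_ (by omega)]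
    · rw [PySem.List.pyGetD_of_nonneg _ _ (by omega)]
      have hlt : n.toNat < 101 := by have := hpre n hmem.1; omega
      rw [List.getD_eq_getElem?_getD, List.getElem?_replicate, if_pos hlt]
      simp
    · intro x hx
      have hxf := List.mem_filter.mp (hl ▸ hx)
      have hx0 : (0 : Int) < x := by simpa using hxf.2
      have := hpre x hxf.1
      simp only [List.length_replicate]
      omega
  rw [PySem.List.foldl_congr_mem (PySem.Set.ofList l)
    (fun q number => heapPush q
      (PySem.List.pyGetD (List.foldl (fun v num => PySem.List.pySetD v num (PySem.List.pyGetD v num 0 + 1))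
        (List.replicate 101 0) l) number 0, number))
    (fun q number => heapPush q ((l.count number : Int), number))
    []
    (by intro acc x hx; simp only [hval x hx])]
  -- B's counting loop is Counter(l)
  rw [PySem.Dict.foldl_insert_getD_add_one_eq_counter, PySem.Dict.items_counter]
  -- sorted2 is the insertBy insertion-sort fold
  rw [show PySem.List.sorted2
        (List.map (fun k => (k, ((l.count k : Int)))) (PySem.Set.ofList l))
        (fun kv => kv.2) (fun kv => kv.1) false
      = List.foldl (fun acc x => PySem.List.insertBy
          (fun a b => decide (a.2 < b.2) || (!decide (b.2 < a.2) && decide (a.1 < b.1))) x acc) []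
          (List.map (fun k => (k, ((l.count k : Int)))) (PySem.Set.ofList l)) from by
    simp [PySem.List.sorted2]]
  -- both append loops flatten; B's slice is take 100, A's capped emit loop too
  rw [PySem.List.foldl_append_eq_flatMap (fun (kv : Int × Int) => [kv.1, kv.2])]
  rw [show (some (100 : Int)) = some (((100 : Nat) : Int)) from rfl, PySem.List.slice_to_natCast]
  rw [emitA_eq _ _ (by simp)]
  -- identify the two sorted sequences via component swap
  have hswap := fold_insert_map_swap (List.map (fun k => (k, ((l.count k : Int)))) (PySem.Set.ofList l)) []
  simp only [List.map_map, List.map_nil] at hswap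
  rw [show (List.foldl (fun q number => heapPush q ((l.count number : Int), number)) [] (PySem.Set.ofList l))
      = List.foldl (fun acc x => heapPush acc x) []
          (List.map ((fun p => (p.2, p.1)) ∘ (fun k => (k, ((l.count k : Int))))) (PySem.Set.ofList l)) from by
    rw [List.foldl_map]; rfl]
  rw [← hswap, List.flatMap_map]

def get_new_arr_raises : Claim_raises_get_new_arr := by
  unfold Claim_raises_get_new_arr
  exact ⟨by intro arr _ ⟨x, hx, h100⟩ hpre; exact absurd (hpre x hx) (by omega), by decide⟩
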